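-- pv_equiv track=rewrite | github.com/elsteveogrande/pico-cxx-hdmi | tablegen.py | dfr
-- ===== SOURCE A (Python) =====
-- def dfr(d):
-- 	x = 0
-- 	add = 1
-- 	d = d[:]
-- 	while d:
-- 		x += add if d[0] else 0
-- 		d = d[1:]
-- 		add <<= 1
--
-- 	return x
-- ===== SOURCE B (Python) =====
-- def dfr(d):
--     x = 0
--     for bit in reversed(d):
--         x = 2 * x + (1 if bit else 0)
--     return x
-- ===== Notes on version B (the rewrite author's own statement) =====
-- stated objective: faster
-- what changed: Replaces A's LSB-first pass with an explicit doubling weight `add` and a d[1:] list copy per iteration by Horner's method over the bits in reverse order, keeping no positional-weight state and making no copies.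
import Mathlib
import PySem

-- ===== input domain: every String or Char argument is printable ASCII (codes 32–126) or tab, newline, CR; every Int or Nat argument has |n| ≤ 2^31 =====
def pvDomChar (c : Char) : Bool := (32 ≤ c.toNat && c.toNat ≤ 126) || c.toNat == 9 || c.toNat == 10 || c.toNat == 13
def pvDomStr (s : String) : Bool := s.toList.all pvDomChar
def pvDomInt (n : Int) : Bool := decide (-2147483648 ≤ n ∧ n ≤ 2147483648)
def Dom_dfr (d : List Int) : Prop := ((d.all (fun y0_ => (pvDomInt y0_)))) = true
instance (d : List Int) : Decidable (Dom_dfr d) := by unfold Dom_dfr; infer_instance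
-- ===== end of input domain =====

-- B replaces A's LSB-first pass with a doubling weight `add` by Horner's method over the reversed bits (idiomatic, no positional-weight state).

-- ===== PORT A =====
-- A's while loop: consume the head of d, accumulate x with weight add, double add.
def dfrGo (d : List Int) (x add : Int) : Int :=
  match d with
  | [] => x
  | h :: t => dfrGo t (x + if h ≠ 0 then add else 0) (add * 2)

def dfr (d : List Int) : Int := dfrGo d 0 1

-- ===== PORT B =====
-- Horner's method: fold over reversed(d), x = 2*x + (1 if bit else 0).
def dfr_alt (d : List Int) : Int :=
  d.reverse.foldl (fun x bit => 2 * x + if bit ≠ 0 then 1 else 0) 0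

-- ===== PRECONDITION & SPEC =====
def Spec_dfr (d : List Int) (out : Int) : Prop := out = dfr_alt d
instance (d : List Int) (out : Int) : Decidable (Spec_dfr d out) := by unfold Spec_dfr; infer_instance

-- ===== CLAIM (what is proved, stated in full; the proofs are below) =====
def Claim_equal_dfr : Prop := ∀ (d : List Int), Dom_dfr d → Spec_dfr d (dfr d)

-- ===== LEMMAS AND PROOFS =====
theorem dfr_alt_cons (h : Int) (t : List Int) :
    dfr_alt (h :: t) = 2 * dfr_alt t + (if h ≠ 0 then 1 else 0) := by
  simp [dfr_alt, List.foldl_append]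

theorem dfrGo_eq (d : List Int) : ∀ x add : Int,
    dfrGo d x add = x + add * dfr_alt d := by
  induction d with
  | nil => intro x add; simp [dfrGo, dfr_alt]
  | cons h t ih =>
    intro x add
    simp only [dfrGo, ih, dfr_alt_cons]
    split_ifs <;> ring

-- ===== VERDICT (by name: the statement is the Claim_ definition above) =====
theorem dfr_spec : Claim_equal_dfr := by
  intro d _
  unfold Spec_dfr dfr
  rw [dfrGo_eq]
  ring
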